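-- pv_equiv track=rewrite | github.com/khan-ashifur/listory-optimized | test_professional_v2.py | _evaluate_description_v2
-- ===== SOURCE A (Python) =====
-- def _evaluate_description_v2(description):
--     if not description:
--         return 0
--
--     score = 0
--
--     # Story opening (8 points)
--     story_openers = ['picture this', 'imagine', 'it\'s', 'you know that feeling', 'ever notice']
--     if any(opener in description.lower() for opener in story_openers):
--         score += 8
--
--     # Problem agitation (6 points)
--     problem_words = ['frustrating', 'annoying', 'tired', 'struggle', 'problem', 'issue']
--     problem_count = sum(1 for word in problem_words if word in description.lower())
--     score += min(problem_count, 6)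
--
--     # Solution positioning (6 points)
--     solution_phrases = ['that\'s why', 'exactly why', 'solution', 'answer', 'fix', 'solve']
--     if any(phrase in description.lower() for phrase in solution_phrases):
--         score += 6
--
--     # Call to action (5 points)
--     cta_words = ['order', 'get', 'choose', 'buy', 'experience', 'discover', 'transform']
--     if any(word in description.lower() for word in cta_words):
--         score += 5
--
--     return min(score, 25)
-- ===== SOURCE B (Python) =====
-- _STORY = ['picture this', 'imagine', "it's", 'you know that feeling', 'ever notice']
-- _PROBLEM = ['frustrating', 'annoying', 'tired', 'struggle', 'problem', 'issue']
-- _SOLUTION = ["that's why", 'exactly why', 'solution', 'answer', 'fix', 'solve']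
-- _CTA = ['order', 'get', 'choose', 'buy', 'experience', 'discover', 'transform']
--
--
-- def _evaluate_description_v2(description):
--     if not description:
--         return 0
--     d = description.lower()
--     # One scan over the text: a first-character index sends each position to the
--     # few keywords that could start there; matches are collected in a set.
--     index = {}
--     for w in _STORY + _PROBLEM + _SOLUTION + _CTA:
--         index.setdefault(w[0], []).append(w)
--     matched = set()
--     for i, c in enumerate(d):
--         for w in index.get(c, []):
--             if d.startswith(w, i):
--                 matched.add(w)
--     score = 8 if matched & set(_STORY) else 0
--     score += min(len(matched & set(_PROBLEM)), 6)
--     score += 6 if matched & set(_SOLUTION) else 0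
--     score += 5 if matched & set(_CTA) else 0
--     return min(score, 25)
-- ===== Notes on version B (the rewrite author's own statement) =====
-- stated objective: alternative
-- what changed: Instead of testing each keyword against the whole text with substring search per group, B makes one scan over the lowered text using a first-character index of all keywords, collects every matching keyword into a set, and scores the four groups by set intersection with that matched set.
import Mathlib
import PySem

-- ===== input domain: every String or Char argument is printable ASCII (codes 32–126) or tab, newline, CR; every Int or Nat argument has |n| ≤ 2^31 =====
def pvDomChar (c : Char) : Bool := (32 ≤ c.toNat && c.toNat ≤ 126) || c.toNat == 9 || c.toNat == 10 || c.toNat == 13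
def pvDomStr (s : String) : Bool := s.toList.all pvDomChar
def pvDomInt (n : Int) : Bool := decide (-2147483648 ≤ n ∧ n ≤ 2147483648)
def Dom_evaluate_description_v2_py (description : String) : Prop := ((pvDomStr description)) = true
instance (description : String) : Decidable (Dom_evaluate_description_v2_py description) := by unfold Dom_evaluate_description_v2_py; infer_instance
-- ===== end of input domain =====

-- B replaces A's per-keyword substring tests by ONE scan over the lowered text: a first-character
-- index maps each position to candidate keywords, matches go into a set, groups are scored by set
-- intersection with that set; objective: alternative (different matching algorithm, similar cost).

-- ===== PORT A =====
def evaluate_description_v2_py (description : String) : Int :=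
  if description.toList = [] then 0
  else
    let score : Int := 0
    let story_openers : List String := ["picture this", "imagine", "it's", "you know that feeling", "ever notice"]
    let score := if story_openers.any (fun opener => PySem.Str.isIn opener (PySem.Str.lower description)) then score + 8 else score
    let problem_words : List String := ["frustrating", "annoying", "tired", "struggle", "problem", "issue"]
    let problem_count : Int := ((problem_words.filter (fun word => PySem.Str.isIn word (PySem.Str.lower description))).map (fun _ => (1 : Int))).sum
    let score := score + min problem_count 6
    let solution_phrases : List String := ["that's why", "exactly why", "solution", "answer", "fix", "solve"]
    let score := if solution_phrases.any (fun phrase => PySem.Str.isIn phrase (PySem.Str.lower description)) then score + 6 else score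
    let cta_words : List String := ["order", "get", "choose", "buy", "experience", "discover", "transform"]
    let score := if cta_words.any (fun word => PySem.Str.isIn word (PySem.Str.lower description)) then score + 5 else score
    min score 25

-- ===== PORT B =====
def pvStory : List String := ["picture this", "imagine", "it's", "you know that feeling", "ever notice"]
def pvProblem : List String := ["frustrating", "annoying", "tired", "struggle", "problem", "issue"]
def pvSolution : List String := ["that's why", "exactly why", "solution", "answer", "fix", "solve"]
def pvCta : List String := ["order", "get", "choose", "buy", "experience", "discover", "transform"]

-- Source B: index = {}; for w in ALL: index.setdefault(w[0], []).append(w)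
-- (w[0] ported as headD ' ': every keyword is nonempty, so exact)
def pvIndex : PySem.Dict Char (List String) :=
  (pvStory ++ pvProblem ++ pvSolution ++ pvCta).foldl
    (fun idx w => idx.insert (w.toList.headD ' ') (idx.getD (w.toList.headD ' ') [] ++ [w])) PySem.Dict.empty

-- Source B: for i, c in enumerate(d): for w in index.get(c, []): if d.startswith(w, i): matched.add(w)
-- (d.startswith(w, i) with 0 ≤ i ported as: w.toList is a prefix of d[i:], which is exact)
def pvScan (dl : List Char) : PySem.Set String :=
  (PySem.List.enumerate dl 0).foldl
    (fun m p =>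
      (pvIndex.getD p.2 []).foldl
        (fun m w => if PySem.Chars.startswith (dl.drop p.1.toNat) w.toList then PySem.Set.add m w else m) m)
    PySem.Set.empty

def evaluate_description_v2_py_alt (description : String) : Int :=
  if description.toList = [] then 0
  else
    let d := PySem.Str.lower description
    let matched := pvScan d.toList
    let score : Int := if PySem.Set.inter matched (PySem.Set.ofList pvStory) ≠ [] then 8 else 0
    let score := score + min ((PySem.Set.inter matched (PySem.Set.ofList pvProblem)).length : Int) 6
    let score := score + (if PySem.Set.inter matched (PySem.Set.ofList pvSolution) ≠ [] then 6 else 0)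
    let score := score + (if PySem.Set.inter matched (PySem.Set.ofList pvCta) ≠ [] then 5 else 0)
    min score 25

-- ===== PRECONDITION & SPEC =====
def Spec_evaluate_description_v2_py (description : String) (out : Int) : Prop := out = evaluate_description_v2_py_alt description
instance (description : String) (out : Int) : Decidable (Spec_evaluate_description_v2_py description out) := by unfold Spec_evaluate_description_v2_py; infer_instance

-- ===== CLAIM (what is proved, stated in full; the proofs are below) =====
def Claim_equal_evaluate_description_v2_py : Prop := ∀ (description : String), Dom_evaluate_description_v2_py description → Spec_evaluate_description_v2_py description (evaluate_description_v2_py description)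

-- ===== LEMMAS AND PROOFS =====

-- membership after the inner fold over one position's candidate keywords
lemma pv_mem_inner (dl : List Char) (i : Nat) (ws : List String) (m : PySem.Set String) (w : String) :
    w ∈ ws.foldl (fun m w' => if PySem.Chars.startswith (dl.drop i) w'.toList then PySem.Set.add m w' else m) m
      ↔ w ∈ m ∨ (w ∈ ws ∧ PySem.Chars.startswith (dl.drop i) w.toList = true) := by
  induction ws generalizing m with
  | nil => simp
  | cons a t ih =>
    simp only [List.foldl_cons, ih]
    by_cases h : PySem.Chars.startswith (dl.drop i) a.toList = true
    · simp only [h, if_true, PySem.Set.mem_add, List.mem_cons]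
      constructor
      · rintro (⟨hm | rfl⟩ | ⟨ht, hs⟩)
        · exact .inl hm
        · exact .inr ⟨.inl rfl, h⟩
        · exact .inr ⟨.inr ht, hs⟩
      · rintro (hm | ⟨rfl | ht, hs⟩)
        · exact .inl (.inl hm)
        · exact .inl (.inr rfl)
        · exact .inr ⟨ht, hs⟩
    · simp only [h, List.mem_cons]
      constructor
      · rintro (hm | ⟨ht, hs⟩)
        · exact .inl hm
        · exact .inr ⟨.inr ht, hs⟩
      · rintro (hm | ⟨rfl | ht, hs⟩)
        · exact .inl hm
        · exact absurd hs h
        · exact .inr ⟨ht, hs⟩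

-- membership after the outer fold over enumerated positions
lemma pv_mem_outer (dl : List Char) (l : List (Int × Char)) (m : PySem.Set String) (w : String) :
    w ∈ l.foldl (fun m p =>
        (pvIndex.getD p.2 []).foldl
          (fun m w' => if PySem.Chars.startswith (dl.drop p.1.toNat) w'.toList then PySem.Set.add m w' else m) m) m
      ↔ w ∈ m ∨ ∃ p ∈ l, w ∈ pvIndex.getD p.2 [] ∧ PySem.Chars.startswith (dl.drop p.1.toNat) w.toList = true := by
  induction l generalizing m with
  | nil => simp
  | cons a t ih =>
    simp only [List.foldl_cons, ih, pv_mem_inner, List.mem_cons]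
    constructor
    · rintro (⟨hm | hs⟩ | ⟨p, hp, h⟩)
      · exact .inl hm
      · exact .inr ⟨a, .inl rfl, hs⟩
      · exact .inr ⟨p, .inr hp, h⟩
    · rintro (hm | ⟨p, rfl | hp, h⟩)
      · exact .inl (.inl hm)
      · exact .inl (.inr h)
      · exact .inr ⟨p, hp, h⟩

lemma pv_mem_scan (dl : List Char) (w : String) :
    w ∈ pvScan dl ↔ ∃ (k : Nat) (_ : k < dl.length),
      w ∈ pvIndex.getD dl[k] [] ∧ PySem.Chars.startswith (dl.drop k) w.toList = true := by
  unfold pvScan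
  rw [pv_mem_outer]
  simp only [PySem.Set.empty, List.not_mem_nil, false_or]
  constructor
  · rintro ⟨p, hp, h1, h2⟩
    rw [PySem.List.mem_enumerate_iff] at hp
    obtain ⟨k, hk, rfl⟩ := hp
    exact ⟨k, hk, by simpa using h1, by simpa using h2⟩
  · rintro ⟨k, hk, h1, h2⟩
    exact ⟨((k : Int), dl[k]), by rw [PySem.List.mem_enumerate_iff]; exact ⟨k, hk, by simp⟩,
      h1, by simpa using h2⟩

-- every keyword is nonempty and registered in the index under its first character
lemma pv_keyword_facts : ∀ w ∈ pvStory ++ pvProblem ++ pvSolution ++ pvCta,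
    w.toList ≠ [] ∧ w ∈ pvIndex.getD (w.toList.headD ' ') [] := by decide

-- a keyword is in the scanned set iff it occurs in the text
lemma pv_mem_scan_iff_isIn (dl : List Char) (w : String)
    (hw : w ∈ pvStory ++ pvProblem ++ pvSolution ++ pvCta) :
    w ∈ pvScan dl ↔ PySem.Chars.isIn w.toList dl = true := by
  obtain ⟨hne, hidx⟩ := pv_keyword_facts w hw
  rw [pv_mem_scan, ← PySem.Chars.exists_prefix_drop_iff_isIn]
  constructor
  · rintro ⟨k, hk, _, hsw⟩
    exact ⟨k, (PySem.Chars.startswith_iff _ _).mp hsw⟩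
  · rintro ⟨j, hpre⟩
    have hj : j < dl.length := by
      by_contra h
      push Not at h
      rw [List.drop_eq_nil_of_le h, List.prefix_nil] at hpre
      exact hne hpre
    have hhead : dl[j] = w.toList.headD ' ' := by
      obtain ⟨t, ht⟩ := hpre
      cases hcw : w.toList with
      | nil => exact absurd hcw hne
      | cons c cs =>
        have hdj : dl.drop j = c :: (cs ++ t) := by rw [← ht, hcw]; simp
        have : (dl.drop j)[0]'(by simp [hdj]) = c := by simp [hdj]
        rw [List.getElem_drop] at this
        simpa [hcw] using this
    exact ⟨j, hj, by rw [hhead]; exact hidx, (PySem.Chars.startswith_iff _ _).mpr hpre⟩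

-- the scanned set has no duplicates
lemma pv_nodup_inner (dl : List Char) (i : Nat) (ws : List String) (m : PySem.Set String)
    (hm : m.Nodup) :
    (ws.foldl (fun m w' => if PySem.Chars.startswith (dl.drop i) w'.toList then PySem.Set.add m w' else m) m).Nodup := by
  induction ws generalizing m with
  | nil => exact hm
  | cons a t ih =>
    simp only [List.foldl_cons]
    split
    · exact ih _ (PySem.Set.nodup_add _ _ hm)
    · exact ih _ hm

lemma pv_nodup_scan (dl : List Char) : (pvScan dl).Nodup := by
  unfold pvScan
  generalize PySem.List.enumerate dl 0 = l
  have h : (PySem.Set.empty : PySem.Set String).Nodup := List.nodup_nil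
  generalize PySem.Set.empty = m at h ⊢
  induction l generalizing m with
  | nil => exact h
  | cons a t ih => exact ih _ (pv_nodup_inner _ _ _ _ h)

-- 'any(w in d for w in gl)' ↔ the intersection of the scan with the group set is non-empty
lemma pv_any_iff_inter (dl : List Char) (gl : List String)
    (hsub : ∀ w ∈ gl, w ∈ pvStory ++ pvProblem ++ pvSolution ++ pvCta) :
    (gl.any (fun w => PySem.Chars.isIn w.toList dl) = true)
      ↔ PySem.Set.inter (pvScan dl) (PySem.Set.ofList gl) ≠ [] := by
  rw [List.any_eq_true, Ne, List.eq_nil_iff_forall_not_mem]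
  push Not
  constructor
  · rintro ⟨w, hw, hin⟩
    exact ⟨w, (PySem.Set.mem_inter _ _ _).mpr ⟨(pv_mem_scan_iff_isIn dl w (hsub w hw)).mpr hin,
      (PySem.Set.mem_ofList _ _).mpr hw⟩⟩
  · rintro ⟨w, hw⟩
    rw [PySem.Set.mem_inter _ _ _, PySem.Set.mem_ofList _ _] at hw
    exact ⟨w, hw.2, (pv_mem_scan_iff_isIn dl w (hsub w hw.2)).mp hw.1⟩

-- the number of group keywords occurring in the text = size of that intersection
lemma pv_count_eq_inter (dl : List Char) (gl : List String) (hnd : gl.Nodup)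
    (hsub : ∀ w ∈ gl, w ∈ pvStory ++ pvProblem ++ pvSolution ++ pvCta) :
    (gl.filter (fun w => PySem.Chars.isIn w.toList dl)).length
      = (PySem.Set.inter (pvScan dl) (PySem.Set.ofList gl)).length := by
  have hperm : (gl.filter (fun w => PySem.Chars.isIn w.toList dl)).Perm
      (PySem.Set.inter (pvScan dl) (PySem.Set.ofList gl)) := by
    rw [List.perm_ext_iff_of_nodup (hnd.filter _) (PySem.Set.nodup_inter _ _ (pv_nodup_scan dl))]
    intro w
    rw [List.mem_filter, PySem.Set.mem_inter _ _ _, PySem.Set.mem_ofList _ _]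
    constructor
    · rintro ⟨hg, hin⟩
      exact ⟨(pv_mem_scan_iff_isIn dl w (hsub w hg)).mpr hin, hg⟩
    · rintro ⟨hm, hg⟩
      exact ⟨hg, (pv_mem_scan_iff_isIn dl w (hsub w hg)).mp hm⟩
  exact hperm.length_eq

-- a 0/1-sum over a filtered list is its length
lemma pv_sum_one (l : List String) : (l.map (fun _ => (1 : Int))).sum = (l.length : Int) := by
  induction l with
  | nil => simp
  | cons a t ih => simp; omega

-- ===== VERDICT (by name: the statement is the Claim_ definition above) =====
theorem evaluate_description_v2_py_spec : Claim_equal_evaluate_description_v2_py := by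
  intro description _
  unfold Spec_evaluate_description_v2_py evaluate_description_v2_py evaluate_description_v2_py_alt
  by_cases h : description.toList = []
  · simp [h]
  · simp only [h, if_false]
    set dl := (PySem.Str.lower description).toList with hdl
    have e1 := pv_any_iff_inter dl pvStory (by intro w hw; simp [hw])
    have e3 := pv_any_iff_inter dl pvSolution (by intro w hw; simp [hw])
    have e4 := pv_any_iff_inter dl pvCta (by intro w hw; simp [hw])
    have e2 := pv_count_eq_inter dl pvProblem (by decide) (by intro w hw; simp [hw])
    simp only [pvStory, pvProblem, pvSolution, pvCta] at e1 e2 e3 e4 ⊢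
    simp only [PySem.Str.isIn_eq, ← hdl, pv_sum_one, e1, e2, e3, e4]
    split_ifs <;> omega
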